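-- pv_equiv track=rewrite | github.com/asynkron/Asynkron.TextLayout | src/textlayout/parser.py | find_text_bounds
-- ===== SOURCE A (Python) =====
-- def find_text_bounds(
--     matrix: list[list[str]], start_row: int, end_row: int, start_col: int, end_col: int
-- ) -> tuple[int, int] | None:
--     """Find actual text bounds within a region. Returns (min_col, max_col) or None."""
--     min_c, max_c = end_col + 1, start_col - 1
--     for r in range(start_row, end_row + 1):
--         for c in range(start_col, end_col):
--             if matrix[r][c] not in (" ", ""):
--                 min_c = min(min_c, c)
--                 max_c = max(max_c, c)
--     return (min_c, max_c) if max_c >= min_c else None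
-- ===== SOURCE B (Python) =====
-- def find_text_bounds(
--     matrix: list[list[str]], start_row: int, end_row: int, start_col: int, end_col: int
-- ) -> tuple[int, int] | None:
--     """Find actual text bounds within a region. Returns (min_col, max_col) or None."""
--     rows = range(start_row, end_row + 1)
--     cols = range(start_col, end_col)
--
--     def col_has_text(c: int) -> bool:
--         return any(matrix[r][c] not in (" ", "") for r in rows)
--
--     # out-of-range sentinels; replaced by the first/last text column if one exists
--     min_c = end_col + 1
--     max_c = start_col - 1
--     if rows:  # without rows no column can contain text: skip the scans
--         min_c = next((c for c in cols if col_has_text(c)), min_c)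
--         max_c = next((c for c in reversed(cols) if col_has_text(c)), max_c)
--     return (min_c, max_c) if max_c >= min_c else None
-- ===== Notes on version B (the rewrite author's own statement) =====
-- stated objective: alternative
-- what changed: Replaced the row-major sweep threading running min/max through nested row-by-column loops by two independent directional column scans: min_c is the first column (left-to-right) and max_c the last column (right-to-left) containing non-space text, with out-of-range sentinels when none exists.
import Mathlib
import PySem

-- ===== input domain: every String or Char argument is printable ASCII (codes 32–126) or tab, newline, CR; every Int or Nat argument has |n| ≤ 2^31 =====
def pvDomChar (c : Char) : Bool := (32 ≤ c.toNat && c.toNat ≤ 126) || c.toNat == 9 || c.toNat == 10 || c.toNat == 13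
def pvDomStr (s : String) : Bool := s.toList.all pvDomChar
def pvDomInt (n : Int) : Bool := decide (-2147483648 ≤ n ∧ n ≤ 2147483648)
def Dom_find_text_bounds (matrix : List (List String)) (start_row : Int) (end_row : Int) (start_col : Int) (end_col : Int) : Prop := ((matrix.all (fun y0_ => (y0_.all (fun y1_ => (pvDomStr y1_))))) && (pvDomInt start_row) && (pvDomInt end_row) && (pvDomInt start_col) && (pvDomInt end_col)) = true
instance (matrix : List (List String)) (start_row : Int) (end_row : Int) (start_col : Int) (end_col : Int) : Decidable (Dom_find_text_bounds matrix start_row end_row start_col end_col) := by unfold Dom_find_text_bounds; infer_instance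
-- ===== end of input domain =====

-- B replaces A's row-major sweep threading running min/max through nested loops by two
-- independent directional column scans (first/last column containing text, out-of-range
-- sentinels when none exists); objective: alternative decomposition, same value everywhere.

-- ===== PORT A =====
-- shared cell test: matrix[r][c] not in (" ", ""); pyGet? is Python indexing (negative
-- indices wrap); the defaults are only reached outside Pre_find_text_bounds
def pvHit (matrix : List (List String)) (r c : Int) : Bool :=
  let s := (PySem.List.pyGet? ((PySem.List.pyGet? matrix r).getD []) c).getD ""
  !(s == " " || s == "")

def find_text_bounds (matrix : List (List String)) (start_row : Int) (end_row : Int) (start_col : Int) (end_col : Int) : Option (Int × Int) :=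
  let st :=
    (PySem.List.pyRange start_row (end_row + 1) 1).foldl (fun (st : Int × Int) r =>
      (PySem.List.pyRange start_col end_col 1).foldl (fun (st : Int × Int) c =>
        if pvHit matrix r c then (min st.1 c, max st.2 c) else st) st)
      (end_col + 1, start_col - 1)
  if st.2 ≥ st.1 then some (st.1, st.2) else none

-- ===== PORT B =====
def pvColHasText (matrix : List (List String)) (start_row : Int) (end_row : Int) (c : Int) : Bool :=
  (PySem.List.pyRange start_row (end_row + 1) 1).any (fun r => pvHit matrix r c)

def find_text_bounds_alt (matrix : List (List String)) (start_row : Int) (end_row : Int) (start_col : Int) (end_col : Int) : Option (Int × Int) :=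
  let cols := PySem.List.pyRange start_col end_col 1
  let p := pvColHasText matrix start_row end_row
  let mc :=
    if end_row + 1 ≤ start_row then (end_col + 1, start_col - 1)   -- 'if rows:' is false: keep the sentinels
    else ((cols.find? p).getD (end_col + 1), (cols.reverse.find? p).getD (start_col - 1))
  if mc.2 ≥ mc.1 then some (mc.1, mc.2) else none

-- ===== PRECONDITION & SPEC =====
-- Pre_: every cell matrix[r][c] the loops touch exists (Python A raises IndexError
-- otherwise), stated in closed form: either no cell is touched (empty column or row
-- range), or all row indices sr..er are in range and every touched row admits all
-- column indices sc..ec-1 (negative Python indices count from the end)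
def Pre_find_text_bounds (matrix : List (List String)) (start_row : Int) (end_row : Int) (start_col : Int) (end_col : Int) : Prop :=
  end_col ≤ start_col ∨ end_row < start_row ∨
  (-(matrix.length : Int) ≤ start_row ∧ end_row < (matrix.length : Int) ∧
    ∀ pr ∈ PySem.List.enumerate matrix 0,
      ((start_row ≤ pr.1 ∧ pr.1 ≤ end_row) ∨
       (start_row ≤ pr.1 - (matrix.length : Int) ∧ pr.1 - (matrix.length : Int) ≤ end_row)) →
      (-(pr.2.length : Int) ≤ start_col ∧ end_col ≤ (pr.2.length : Int)))
instance (matrix : List (List String)) (start_row : Int) (end_row : Int) (start_col : Int) (end_col : Int) : Decidable (Pre_find_text_bounds matrix start_row end_row start_col end_col) := by unfold Pre_find_text_bounds; infer_instance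
def pvWitness_find_text_bounds : List (List String) × Int × Int × Int × Int := ([["x"]], 0, 0, 0, 1)

def Spec_find_text_bounds (matrix : List (List String)) (start_row : Int) (end_row : Int) (start_col : Int) (end_col : Int) (out : Option (Int × Int)) : Prop := out = find_text_bounds_alt matrix start_row end_row start_col end_col
instance (matrix : List (List String)) (start_row : Int) (end_row : Int) (start_col : Int) (end_col : Int) (out : Option (Int × Int)) : Decidable (Spec_find_text_bounds matrix start_row end_row start_col end_col out) := by unfold Spec_find_text_bounds; infer_instance

-- ===== CLAIM (what is proved, stated in full; the proofs are below) =====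
def Claim_equal_find_text_bounds : Prop := ∀ (matrix : List (List String)) (start_row : Int) (end_row : Int) (start_col : Int) (end_col : Int), Dom_find_text_bounds matrix start_row end_row start_col end_col → Pre_find_text_bounds matrix start_row end_row start_col end_col → Spec_find_text_bounds matrix start_row end_row start_col end_col (find_text_bounds matrix start_row end_row start_col end_col)

-- ===== LEMMAS AND PROOFS =====

-- min/max machinery: pvRmin/pvRmax p l is the min/max of the elements of l satisfying p
def pvStepMin (p : Int → Bool) (o : Option Int) (c : Int) : Option Int :=
  if p c then some (match o with | none => c | some a => min a c) else o
def pvStepMax (p : Int → Bool) (o : Option Int) (c : Int) : Option Int :=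
  if p c then some (match o with | none => c | some a => max a c) else o
def pvRmin (p : Int → Bool) (l : List Int) : Option Int := l.foldl (pvStepMin p) none
def pvRmax (p : Int → Bool) (l : List Int) : Option Int := l.foldl (pvStepMax p) none
def pvMerge (f : Int → Int → Int) (o1 o2 : Option Int) : Option Int :=
  match o1, o2 with
  | none, o => o
  | o, none => o
  | some a, some b => some (f a b)

theorem pv_foldl_min_shift (p : Int → Bool) (l : List Int) : ∀ (m a : Int),
    l.foldl (fun m c => if p c then min m c else m) (min m a)
      = min m (l.foldl (fun m c => if p c then min m c else m) a) := by
  induction l with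
  | nil => intro m a; rfl
  | cons c t ih =>
    intro m a
    simp only [List.foldl_cons]
    by_cases hp : p c
    · rw [if_pos hp, if_pos hp, min_assoc, ih]
    · rw [if_neg hp, if_neg hp, ih]

theorem pv_foldl_max_shift (p : Int → Bool) (l : List Int) : ∀ (m a : Int),
    l.foldl (fun m c => if p c then max m c else m) (max m a)
      = max m (l.foldl (fun m c => if p c then max m c else m) a) := by
  induction l with
  | nil => intro m a; rfl
  | cons c t ih =>
    intro m a
    simp only [List.foldl_cons]
    by_cases hp : p c
    · rw [if_pos hp, if_pos hp, max_assoc, ih]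
    · rw [if_neg hp, if_neg hp, ih]

theorem pv_R_some_min (p : Int → Bool) (t : List Int) : ∀ a : Int,
    t.foldl (pvStepMin p) (some a) = some (t.foldl (fun m c => if p c then min m c else m) a) := by
  induction t with
  | nil => intro a; rfl
  | cons c t ih =>
    intro a
    simp only [List.foldl_cons, pvStepMin]
    by_cases hp : p c
    · rw [if_pos hp, if_pos hp]; exact ih (min a c)
    · rw [if_neg hp, if_neg hp]; exact ih a

theorem pv_R_some_max (p : Int → Bool) (t : List Int) : ∀ a : Int,
    t.foldl (pvStepMax p) (some a) = some (t.foldl (fun m c => if p c then max m c else m) a) := by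
  induction t with
  | nil => intro a; rfl
  | cons c t ih =>
    intro a
    simp only [List.foldl_cons, pvStepMax]
    by_cases hp : p c
    · rw [if_pos hp, if_pos hp]; exact ih (max a c)
    · rw [if_neg hp, if_neg hp]; exact ih a

theorem pv_min_char (p : Int → Bool) (l : List Int) : ∀ m : Int,
    l.foldl (fun m c => if p c then min m c else m) m
      = match pvRmin p l with | none => m | some a => min m a := by
  induction l with
  | nil => intro m; rfl
  | cons c t ih =>
    intro m
    simp only [List.foldl_cons, pvRmin, pvStepMin]
    by_cases hp : p c
    · rw [if_pos hp, if_pos hp, pv_R_some_min]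
      exact pv_foldl_min_shift p t m c
    · rw [if_neg hp, if_neg hp]
      exact ih m

theorem pv_max_char (p : Int → Bool) (l : List Int) : ∀ m : Int,
    l.foldl (fun m c => if p c then max m c else m) m
      = match pvRmax p l with | none => m | some a => max m a := by
  induction l with
  | nil => intro m; rfl
  | cons c t ih =>
    intro m
    simp only [List.foldl_cons, pvRmax, pvStepMax]
    by_cases hp : p c
    · rw [if_pos hp, if_pos hp, pv_R_some_max]
      exact pv_foldl_max_shift p t m c
    · rw [if_neg hp, if_neg hp]
      exact ih m

theorem pv_step_or_min (p q : Int → Bool) (o1 o2 : Option Int) (c : Int) :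
    pvStepMin (fun c => p c || q c) (pvMerge min o1 o2) c
      = pvMerge min (pvStepMin p o1 c) (pvStepMin q o2 c) := by
  by_cases hp : p c <;> by_cases hq : q c <;>
    cases o1 <;> cases o2 <;>
    simp [pvStepMin, pvMerge, hp, hq] <;> omega

theorem pv_step_or_max (p q : Int → Bool) (o1 o2 : Option Int) (c : Int) :
    pvStepMax (fun c => p c || q c) (pvMerge max o1 o2) c
      = pvMerge max (pvStepMax p o1 c) (pvStepMax q o2 c) := by
  by_cases hp : p c <;> by_cases hq : q c <;>
    cases o1 <;> cases o2 <;>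
    simp [pvStepMax, pvMerge, hp, hq] <;> omega

theorem pv_min_or_aux (p q : Int → Bool) (l : List Int) : ∀ (o1 o2 : Option Int),
    l.foldl (pvStepMin (fun c => p c || q c)) (pvMerge min o1 o2)
      = pvMerge min (l.foldl (pvStepMin p) o1) (l.foldl (pvStepMin q) o2) := by
  induction l with
  | nil => intro o1 o2; rfl
  | cons c t ih =>
    intro o1 o2
    simp only [List.foldl_cons, pv_step_or_min, ih]

theorem pv_max_or_aux (p q : Int → Bool) (l : List Int) : ∀ (o1 o2 : Option Int),
    l.foldl (pvStepMax (fun c => p c || q c)) (pvMerge max o1 o2)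
      = pvMerge max (l.foldl (pvStepMax p) o1) (l.foldl (pvStepMax q) o2) := by
  induction l with
  | nil => intro o1 o2; rfl
  | cons c t ih =>
    intro o1 o2
    simp only [List.foldl_cons, pv_step_or_max, ih]

theorem pv_min_or (p q : Int → Bool) (l : List Int) :
    pvRmin (fun c => p c || q c) l = pvMerge min (pvRmin p l) (pvRmin q l) :=
  pv_min_or_aux p q l none none

theorem pv_max_or (p q : Int → Bool) (l : List Int) :
    pvRmax (fun c => p c || q c) l = pvMerge max (pvRmax p l) (pvRmax q l) :=
  pv_max_or_aux p q l none none

theorem pv_foldl_const {α β : Type} (l : List α) (o : β) : l.foldl (fun o _ => o) o = o := by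
  induction l with
  | nil => rfl
  | cons c t ih => exact ih

theorem pvRmin_false (l : List Int) : pvRmin (fun _ => false) l = none := by
  unfold pvRmin
  have h : pvStepMin (fun _ => false) = fun o (_ : Int) => o := by
    funext o c; simp [pvStepMin]
  rw [h, pv_foldl_const]

theorem pvRmax_false (l : List Int) : pvRmax (fun _ => false) l = none := by
  unfold pvRmax
  have h : pvStepMax (fun _ => false) = fun o (_ : Int) => o := by
    funext o c; simp [pvStepMax]
  rw [h, pv_foldl_const]

theorem pv_outer_min (matrix : List (List String)) (cols : List Int) :
    ∀ (rows : List Int) (m : Int),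
    rows.foldl (fun m r => cols.foldl (fun m c => if pvHit matrix r c then min m c else m) m) m
      = match pvRmin (fun c => rows.any (fun r => pvHit matrix r c)) cols with
        | none => m | some a => min m a := by
  intro rows
  induction rows with
  | nil =>
    intro m
    have h : (fun c => ([] : List Int).any (fun r => pvHit matrix r c)) = fun _ => false := by
      funext c; simp
    simp only [List.foldl_nil, h, pvRmin_false]
  | cons r rs ih =>
    intro m
    have hpred : (fun c => (r :: rs).any (fun r => pvHit matrix r c))
        = fun c => pvHit matrix r c || rs.any (fun r => pvHit matrix r c) := by
      funext c; simp
    simp only [List.foldl_cons, hpred, pv_min_or]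
    rw [ih, pv_min_char (pvHit matrix r) cols m]
    cases h1 : pvRmin (pvHit matrix r) cols <;>
      cases h2 : pvRmin (fun c => rs.any fun r => pvHit matrix r c) cols <;>
      simp [pvMerge] <;> omega

theorem pv_outer_max (matrix : List (List String)) (cols : List Int) :
    ∀ (rows : List Int) (m : Int),
    rows.foldl (fun m r => cols.foldl (fun m c => if pvHit matrix r c then max m c else m) m) m
      = match pvRmax (fun c => rows.any (fun r => pvHit matrix r c)) cols with
        | none => m | some a => max m a := by
  intro rows
  induction rows with
  | nil =>
    intro m
    have h : (fun c => ([] : List Int).any (fun r => pvHit matrix r c)) = fun _ => false := by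
      funext c; simp
    simp only [List.foldl_nil, h, pvRmax_false]
  | cons r rs ih =>
    intro m
    have hpred : (fun c => (r :: rs).any (fun r => pvHit matrix r c))
        = fun c => pvHit matrix r c || rs.any (fun r => pvHit matrix r c) := by
      funext c; simp
    simp only [List.foldl_cons, hpred, pv_max_or]
    rw [ih, pv_max_char (pvHit matrix r) cols m]
    cases h1 : pvRmax (pvHit matrix r) cols <;>
      cases h2 : pvRmax (fun c => rs.any fun r => pvHit matrix r c) cols <;>
      simp [pvMerge] <;> omega

theorem pv_pair_inner (matrix : List (List String)) (r : Int) (cols : List Int) :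
    ∀ (st : Int × Int),
    cols.foldl (fun (st : Int × Int) c => if pvHit matrix r c then (min st.1 c, max st.2 c) else st) st
      = (cols.foldl (fun m c => if pvHit matrix r c then min m c else m) st.1,
         cols.foldl (fun m c => if pvHit matrix r c then max m c else m) st.2) := by
  induction cols with
  | nil => intro st; rfl
  | cons c t ih =>
    intro st
    simp only [List.foldl_cons]
    by_cases hp : pvHit matrix r c
    · rw [if_pos hp, if_pos hp, if_pos hp]
      exact ih (min st.1 c, max st.2 c)
    · rw [if_neg hp, if_neg hp, if_neg hp]
      exact ih st

theorem pv_pair_outer (matrix : List (List String)) (cols : List Int) (rows : List Int) :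
    ∀ (st : Int × Int),
    rows.foldl (fun (st : Int × Int) r =>
        cols.foldl (fun (st : Int × Int) c => if pvHit matrix r c then (min st.1 c, max st.2 c) else st) st) st
      = (rows.foldl (fun m r => cols.foldl (fun m c => if pvHit matrix r c then min m c else m) m) st.1,
         rows.foldl (fun m r => cols.foldl (fun m c => if pvHit matrix r c then max m c else m) m) st.2) := by
  induction rows with
  | nil => intro st; rfl
  | cons r rs ih =>
    intro st
    rw [List.foldl_cons, pv_pair_inner, List.foldl_cons, List.foldl_cons]
    exact ih _

-- sorted characterizations: on a strictly increasing list pvRmin is the first match,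
-- pvRmax the last match
theorem pv_R_stay_min (p : Int → Bool) : ∀ (t : List Int) (a : Int), (∀ x ∈ t, a ≤ x) →
    t.foldl (pvStepMin p) (some a) = some a := by
  intro t
  induction t with
  | nil => intro a _; rfl
  | cons x t ih =>
    intro a h
    have hax : a ≤ x := h x (by simp)
    simp only [List.foldl_cons, pvStepMin]
    by_cases hp : p x
    · rw [if_pos hp]
      have : min a x = a := min_eq_left hax
      rw [this]
      exact ih a (fun y hy => h y (by simp [hy]))
    · rw [if_neg hp]
      exact ih a (fun y hy => h y (by simp [hy]))

theorem pv_Rmin_sorted (p : Int → Bool) : ∀ (l : List Int), l.Pairwise (· < ·) →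
    pvRmin p l = l.find? p := by
  intro l
  induction l with
  | nil => intro _; rfl
  | cons c t ih =>
    intro hpair
    rw [List.pairwise_cons] at hpair
    simp only [pvRmin, List.foldl_cons, pvStepMin]
    by_cases hp : p c
    · rw [if_pos hp, List.find?_cons_of_pos hp]
      exact pv_R_stay_min p t c (fun x hx => le_of_lt (hpair.1 x hx))
    · rw [if_neg hp, List.find?_cons_of_neg hp]
      exact ih hpair.2

theorem pv_R_stay_max (p : Int → Bool) : ∀ (t : List Int) (a : Int), (∀ x ∈ t, a ≤ x) →
    t.Pairwise (· < ·) →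
    t.foldl (pvStepMax p) (some a) = (t.reverse.find? p).or (some a) := by
  intro t
  induction t with
  | nil => intro a _ _; rfl
  | cons x t ih =>
    intro a h hpair
    rw [List.pairwise_cons] at hpair
    have hax : a ≤ x := h x (by simp)
    have hlt : ∀ y ∈ t, x ≤ y := fun y hy => le_of_lt (hpair.1 y hy)
    simp only [List.foldl_cons, pvStepMax]
    by_cases hp : p x
    · rw [if_pos hp]
      have : max a x = x := max_eq_right hax
      rw [this, ih x hlt hpair.2]
      rw [List.reverse_cons, List.find?_append, List.find?_cons_of_pos hp]
      cases t.reverse.find? p <;> rfl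
    · rw [if_neg hp]
      rw [ih a (fun y hy => le_trans hax (hlt y hy)) hpair.2]
      rw [List.reverse_cons, List.find?_append, List.find?_cons_of_neg hp]
      cases t.reverse.find? p <;> rfl

theorem pv_Rmax_sorted (p : Int → Bool) : ∀ (l : List Int), l.Pairwise (· < ·) →
    pvRmax p l = l.reverse.find? p := by
  intro l
  induction l with
  | nil => intro _; rfl
  | cons c t ih =>
    intro hpair
    rw [List.pairwise_cons] at hpair
    simp only [pvRmax, List.foldl_cons, pvStepMax]
    by_cases hp : p c
    · rw [if_pos hp, pv_R_stay_max p t c (fun x hx => le_of_lt (hpair.1 x hx)) hpair.2]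
      rw [List.reverse_cons, List.find?_append, List.find?_cons_of_pos hp]
    · rw [if_neg hp]
      show pvRmax p t = _
      rw [ih hpair.2, List.reverse_cons, List.find?_append, List.find?_cons_of_neg hp,
        List.find?_nil]
      cases t.reverse.find? p <;> rfl

-- ===== VERDICT (by name: the statement is the Claim_ definition above) =====
theorem find_text_bounds_spec : Claim_equal_find_text_bounds := by
  intro matrix sr er sc ec _ _
  unfold Spec_find_text_bounds
  unfold find_text_bounds find_text_bounds_alt
  set rows := PySem.List.pyRange sr (er + 1) 1 with hrows
  set cols := PySem.List.pyRange sc ec 1 with hcols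
  have hsorted : cols.Pairwise (· < ·) := PySem.List.pairwise_lt_pyRange_one sc ec
  have hQ : pvColHasText matrix sr er = fun c => rows.any (fun r => pvHit matrix r c) := by
    funext c; rfl
  rw [pv_pair_outer, pv_outer_min, pv_outer_max,
    pv_Rmin_sorted _ _ hsorted, pv_Rmax_sorted _ _ hsorted, hQ]
  by_cases hre : er + 1 ≤ sr
  case pos =>
    have hrownil : rows = [] := PySem.List.pyRange_one_eq_nil hre
    have hfind : cols.find? (fun c => rows.any fun r => pvHit matrix r c) = none := by
      rw [List.find?_eq_none]; intro x _; rw [hrownil]; simp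
    have hrev : cols.reverse.find? (fun c => rows.any fun r => pvHit matrix r c) = none := by
      rw [List.find?_eq_none]; intro x _; rw [hrownil]; simp
    simp only [hfind, hrev, if_pos hre, Option.getD_none]
  case neg =>
    simp only [if_neg hre]
    cases hfind : cols.find? (fun c => rows.any fun r => pvHit matrix r c) with
    | none =>
      have hrev : cols.reverse.find? (fun c => rows.any fun r => pvHit matrix r c) = none := by
        rw [List.find?_eq_none] at hfind ⊢
        intro x hx; exact hfind x (List.mem_reverse.mp hx)
      simp only [hfind, hrev, Option.getD_none]
    | some a =>
      have hamem := List.mem_of_find?_eq_some hfind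
      have hpa := List.find?_some hfind
      have haR : a ∈ cols.reverse := List.mem_reverse.mpr hamem
      cases hrev : cols.reverse.find? (fun c => rows.any fun r => pvHit matrix r c) with
      | none =>
        rw [List.find?_eq_none] at hrev
        exact absurd hpa (by simpa using hrev a haR)
      | some b =>
        have hbmem := List.mem_reverse.mp (List.mem_of_find?_eq_some hrev)
        have hacol := (PySem.List.mem_pyRange_one).mp hamem
        have hbcol := (PySem.List.mem_pyRange_one).mp hbmem
        have h1 : min (ec + 1) a = a := by omega
        have h2 : max (sc - 1) b = b := by omega
        simp only [hfind, hrev, h1, h2, Option.getD_some]
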